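-- pv_equiv track=rewrite | github.com/gotchoices/forma | studies/R28-particle-spectrum/scripts/track1_cross_shear_sweep.py | spin_achievable
-- ===== SOURCE A (Python) =====
-- def spin_achievable(n1, n5, target_spin):
--     n1_odd = abs(n1) % 2
--     n5_odd = abs(n5) % 2
--     base_odd = n1_odd + n5_odd
--
--     for n3_try in [0, 1]:
--         total = base_odd + n3_try
--         if total == target_spin:
--             return True, n3_try
--         if target_spin == 0 and total == 2:
--             return True, n3_try
--     return False, None
-- ===== SOURCE B (Python) =====
-- def spin_achievable(n1, n5, target_spin):
--     # Branch-free arithmetic: the required n3 is always (target_spin - base_odd) % 2,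
--     # and the target is achievable iff that difference is 0 or 1, or the target is 0.
--     base_odd = abs(n1) % 2 + abs(n5) % 2
--     diff = target_spin - base_odd
--     if 0 <= diff <= 1 or target_spin == 0:
--         return True, diff % 2
--     return False, None
-- ===== Notes on version B (the rewrite author's own statement) =====
-- stated objective: alternative
-- what changed: Replaced the search loop over n3_try in [0,1] by a single branch-free arithmetic formula: the witness is always (target_spin - base_odd) % 2 and achievability is one inequality-or-zero test, so no candidate enumeration or per-case witness selection remains.
import Mathlib
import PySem

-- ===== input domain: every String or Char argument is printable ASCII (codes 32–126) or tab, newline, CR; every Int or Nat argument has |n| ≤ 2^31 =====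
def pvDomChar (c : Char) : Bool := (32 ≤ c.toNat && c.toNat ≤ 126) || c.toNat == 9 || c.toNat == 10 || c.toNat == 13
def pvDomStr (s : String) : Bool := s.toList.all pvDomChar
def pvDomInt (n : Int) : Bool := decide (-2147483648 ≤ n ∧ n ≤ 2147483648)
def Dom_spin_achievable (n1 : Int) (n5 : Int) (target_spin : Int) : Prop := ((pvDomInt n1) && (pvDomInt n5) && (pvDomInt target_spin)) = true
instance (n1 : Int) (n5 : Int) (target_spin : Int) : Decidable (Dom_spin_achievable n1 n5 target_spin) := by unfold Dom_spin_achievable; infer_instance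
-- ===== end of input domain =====

-- B replaces A's candidate search over n3_try ∈ [0,1] by one arithmetic formula:
-- witness (target_spin - base_odd) % 2, achievable iff 0 ≤ diff ≤ 1 or target_spin = 0 (alternative, no enumeration).

-- ===== PORT A =====
-- the for-loop with early return, transliterated as structural recursion over the list [0, 1]
def spin_achievable_loop (base_odd : Int) (target_spin : Int) : List Int → Bool × Option Int
  | [] => (false, none)
  | n3_try :: rest =>
    let total := base_odd + n3_try
    if total = target_spin then (true, some n3_try)
    else if target_spin = 0 ∧ total = 2 then (true, some n3_try)
    else spin_achievable_loop base_odd target_spin rest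

def spin_achievable (n1 : Int) (n5 : Int) (target_spin : Int) : Bool × Option Int :=
  let n1_odd := PySem.Int.mod |n1| 2
  let n5_odd := PySem.Int.mod |n5| 2
  let base_odd := n1_odd + n5_odd
  spin_achievable_loop base_odd target_spin [0, 1]

-- ===== PORT B =====
def spin_achievable_alt (n1 : Int) (n5 : Int) (target_spin : Int) : Bool × Option Int :=
  let base_odd := PySem.Int.mod |n1| 2 + PySem.Int.mod |n5| 2
  let diff := target_spin - base_odd
  if (0 ≤ diff ∧ diff ≤ 1) ∨ target_spin = 0 then (true, some (PySem.Int.mod diff 2))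
  else (false, none)

-- ===== PRECONDITION & SPEC =====
def Spec_spin_achievable (n1 : Int) (n5 : Int) (target_spin : Int) (out : Bool × Option Int) : Prop := out = spin_achievable_alt n1 n5 target_spin
instance (n1 : Int) (n5 : Int) (target_spin : Int) (out : Bool × Option Int) : Decidable (Spec_spin_achievable n1 n5 target_spin out) := by unfold Spec_spin_achievable; infer_instance

-- ===== CLAIM =====
def Claim_equal_spin_achievable : Prop := ∀ (n1 : Int) (n5 : Int) (target_spin : Int), Dom_spin_achievable n1 n5 target_spin → Spec_spin_achievable n1 n5 target_spin (spin_achievable n1 n5 target_spin)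

-- ===== LEMMAS AND PROOFS =====
theorem pymod_two_abs (n : Int) : PySem.Int.mod |n| 2 = 0 ∨ PySem.Int.mod |n| 2 = 1 := by
  have h0 := PySem.Int.mod_nonneg |n| (b := 2) (by norm_num)
  have h1 := PySem.Int.mod_lt |n| (b := 2) (by norm_num)
  omega

theorem pymod_two_eq (d : Int) (h : d = 0 ∨ d = 1 ∨ d = -1 ∨ d = -2) :
    PySem.Int.mod d 2 = if d = 0 ∨ d = -2 then 0 else 1 := by
  rcases h with rfl | rfl | rfl | rfl <;> decide

theorem loop_eq_formula (c t : Int) (hc : c = 0 ∨ c = 1 ∨ c = 2) :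
    spin_achievable_loop c t [0, 1] =
      (if (0 ≤ t - c ∧ t - c ≤ 1) ∨ t = 0 then (true, some (PySem.Int.mod (t - c) 2))
       else (false, none)) := by
  have hb : t - c = 0 ∨ t - c = 1 ∨ t = 0 ∨ ¬ ((0 ≤ t - c ∧ t - c ≤ 1) ∨ t = 0) := by omega
  simp only [spin_achievable_loop]
  rcases hb with hd | hd | ht | hno
  · rw [if_pos (Or.inl ⟨by omega, by omega⟩)]
    rw [pymod_two_eq _ (by omega)]
    split_ifs <;> first | rfl | omega
  · rw [if_pos (Or.inl ⟨by omega, by omega⟩)]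
    rw [pymod_two_eq _ (by omega)]
    split_ifs <;> first | rfl | omega
  · subst ht
    rw [if_pos (Or.inr rfl)]
    rw [pymod_two_eq _ (by omega)]
    rcases hc with rfl | rfl | rfl <;> norm_num
  · rw [if_neg hno]
    split_ifs <;> first | rfl | omega

-- ===== VERDICT =====
theorem spin_achievable_spec : Claim_equal_spin_achievable := by
  intro n1 n5 t _
  unfold Spec_spin_achievable spin_achievable spin_achievable_alt
  exact loop_eq_formula _ t (by rcases pymod_two_abs n1 with h1 | h1 <;> rcases pymod_two_abs n5 with h5 | h5 <;> omega)
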